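-- pv_equiv track=rewrite | github.com/ulumulu14/algorithms_and_data_structures | zadanie 4.2.py | prostokat
-- ===== SOURCE A (Python) =====
-- def prostokat(k, w):
--     s = ""
--
--     for i in range(k):
--         for j in range(w):
--             s += "+---"
--
--         s += "+\n"
--
--         for j in range(w):
--             s += "|   "
--
--         s += "|\n"
--
--     for i in range(w):
--         s += "+---"
--
--     s += "+\n"
--
--     return s
-- ===== SOURCE B (Python) =====
-- def prostokat(k, w):
--     K = k if k > 0 else 0
--     W = w if w > 0 else 0
--     # each character is determined by its coordinates: column mod 4 picks the
--     # corner/filler character, row parity picks edge vs interior row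
--     edge = "".join('+' if c % 4 == 0 else '-' for c in range(4 * W + 1)) + "\n"
--     fill = "".join('|' if c % 4 == 0 else ' ' for c in range(4 * W + 1)) + "\n"
--     return "".join(edge if r % 2 == 0 else fill for r in range(2 * K + 1))
-- ===== Notes on version B (the rewrite author's own statement) =====
-- stated objective: alternative
-- what changed: B computes each character of the grid from its coordinates (column mod 4, row parity): the two row templates are generated once by a per-column formula and rows are then selected by parity and joined, instead of A's nested loops concatenating per-cell string pieces into one accumulator.
import Mathlib
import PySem

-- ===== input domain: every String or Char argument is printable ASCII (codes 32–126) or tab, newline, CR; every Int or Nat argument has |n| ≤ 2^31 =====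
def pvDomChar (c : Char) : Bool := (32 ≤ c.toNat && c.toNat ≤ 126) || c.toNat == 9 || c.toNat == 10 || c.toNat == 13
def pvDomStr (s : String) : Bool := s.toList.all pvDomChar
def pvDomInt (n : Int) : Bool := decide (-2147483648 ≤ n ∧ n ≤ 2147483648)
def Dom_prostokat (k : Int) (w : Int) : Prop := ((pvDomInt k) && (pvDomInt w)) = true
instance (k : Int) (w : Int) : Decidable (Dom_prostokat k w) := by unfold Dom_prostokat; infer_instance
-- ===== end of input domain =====

-- B computes every character of the grid directly from its (row, column) coordinates
-- (parity of the row, column mod 4) instead of A's nested per-cell concatenation loops.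

-- ===== PORT A =====
def prostokat (k : Int) (w : Int) : String :=
  let s := ""
  let s := (PySem.List.pyRange 0 k 1).foldl (fun s _ =>
    let s := (PySem.List.pyRange 0 w 1).foldl (fun s _ => s ++ "+---") s
    let s := s ++ "+\n"
    let s := (PySem.List.pyRange 0 w 1).foldl (fun s _ => s ++ "|   ") s
    s ++ "|\n") s
  let s := (PySem.List.pyRange 0 w 1).foldl (fun s _ => s ++ "+---") s
  s ++ "+\n"

-- ===== PORT B =====
def prostokat_alt (k : Int) (w : Int) : String :=
  let K : Nat := k.toNat   -- `k if k > 0 else 0`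
  let W : Nat := w.toNat   -- `w if w > 0 else 0`
  let edge := String.ofList ((List.range (4 * W + 1)).map (fun c => if c % 4 == 0 then '+' else '-')) ++ "\n"
  let fill := String.ofList ((List.range (4 * W + 1)).map (fun c => if c % 4 == 0 then '|' else ' ')) ++ "\n"
  String.join ((List.range (2 * K + 1)).map (fun r => if r % 2 == 0 then edge else fill))

-- ===== PRECONDITION & SPEC =====
def Spec_prostokat (k : Int) (w : Int) (out : String) : Prop := out = prostokat_alt k w
instance (k : Int) (w : Int) (out : String) : Decidable (Spec_prostokat k w out) := by unfold Spec_prostokat; infer_instance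

-- ===== CLAIM (what is proved, stated in full; the proofs are below) =====
def Claim_equal_prostokat : Prop := ∀ (k : Int) (w : Int), Dom_prostokat k w → Spec_prostokat k w (prostokat k w)

-- ===== LEMMAS AND PROOFS =====

-- A-side: shift a foldl-append accumulator out front.
theorem pv_join_shift (l : List String) :
    ∀ a : String, l.foldl (fun acc x => acc ++ x) a = a ++ l.foldl (fun acc x => acc ++ x) "" := by
  induction l with
  | nil => intro a; simp [List.foldl, String.append_empty]
  | cons x xs ihx =>
      intro a
      simp only [List.foldl]
      rw [ihx (a ++ x), ihx ("" ++ x), String.empty_append, String.append_assoc]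

theorem pv_foldl_const_append (l : List Int) :
    ∀ s t : String, l.foldl (fun acc _ => acc ++ t) s = s ++ String.join (List.replicate l.length t) := by
  induction l with
  | nil => intro s t; simp [String.join, List.foldl, String.append_empty]
  | cons h tl ih =>
      intro s t
      simp only [List.foldl, List.length_cons, List.replicate_succ, String.join, ih]
      rw [pv_join_shift _ ("" ++ t), String.empty_append, String.append_assoc]

-- the two row strings, used only by the proofs
def pvE (W : Nat) : String := String.join (List.replicate W "+---") ++ "+\n"
def pvF (W : Nat) : String := String.join (List.replicate W "|   ") ++ "|\n"

theorem prostokat_closed (k w : Int) :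
    prostokat k w = String.join (List.replicate k.toNat (pvE w.toNat ++ pvF w.toNat)) ++ pvE w.toNat := by
  unfold prostokat pvE pvF
  simp only []
  have hw : (PySem.List.pyRange 0 w 1).length = w.toNat := by
    rw [PySem.List.length_pyRange_one]; omega
  have hk : (PySem.List.pyRange 0 k 1).length = k.toNat := by
    rw [PySem.List.length_pyRange_one]; omega
  set E : String := String.join (List.replicate w.toNat "+---") ++ "+\n" with hE
  set F : String := String.join (List.replicate w.toNat "|   ") ++ "|\n" with hF
  have hbody : (fun (s : String) (_ : Int) =>
      ((PySem.List.pyRange 0 w 1).foldl (fun s _ => s ++ "|   ")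
        ((PySem.List.pyRange 0 w 1).foldl (fun s _ => s ++ "+---") s ++ "+\n")) ++ "|\n")
      = fun (s : String) (_ : Int) => s ++ (E ++ F) := by
    funext s i
    rw [pv_foldl_const_append, pv_foldl_const_append, hw, hE, hF]
    simp [String.append_assoc]
  rw [hbody, pv_foldl_const_append, pv_foldl_const_append, hk, hw,
      String.empty_append, String.append_assoc]

theorem pv_toList_join (l : List String) :
    (String.join l).toList = (l.map String.toList).flatten := by
  induction l with
  | nil => simp [String.join]
  | cons x xs ih =>
      have : String.join (x :: xs) = x ++ String.join xs := by
        simp [String.join]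
        rw [pv_join_shift]
      simp [this, ih]

-- B-side row characterisations
theorem pv_row_edge (W : Nat) :
    (List.range (4 * W + 1)).map (fun c => if c % 4 = 0 then '+' else '-') =
      (List.replicate W ['+', '-', '-', '-']).flatten ++ ['+'] := by
  induction W with
  | zero => simp
  | succ n ih =>
      have h4 : 4 * (n + 1) + 1 = (4 * n + 1) + 4 := by ring
      rw [h4, List.range_add, List.map_append, ih, List.replicate_succ', List.flatten_append]
      have e1 : (4 * n + 1 + 0) % 4 = 1 := by omega
      have e2 : (4 * n + 1 + 1) % 4 = 2 := by omega
      have e3 : (4 * n + 1 + 2) % 4 = 3 := by omega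
      have e4 : (4 * n + 1 + 3) % 4 = 0 := by omega
      simp [List.range_succ, e1, e2, e3, e4]

theorem pv_row_fill (W : Nat) :
    (List.range (4 * W + 1)).map (fun c => if c % 4 = 0 then '|' else ' ') =
      (List.replicate W ['|', ' ', ' ', ' ']).flatten ++ ['|'] := by
  induction W with
  | zero => simp
  | succ n ih =>
      have h4 : 4 * (n + 1) + 1 = (4 * n + 1) + 4 := by ring
      rw [h4, List.range_add, List.map_append, ih, List.replicate_succ', List.flatten_append]
      have e1 : (4 * n + 1 + 0) % 4 = 1 := by omega
      have e2 : (4 * n + 1 + 1) % 4 = 2 := by omega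
      have e3 : (4 * n + 1 + 2) % 4 = 3 := by omega
      have e4 : (4 * n + 1 + 3) % 4 = 0 := by omega
      simp [List.range_succ, e1, e2, e3, e4]

theorem pv_toList_E (W : Nat) :
    (pvE W).toList = (List.replicate W ['+', '-', '-', '-']).flatten ++ ['+', '\n'] := by
  unfold pvE
  rw [String.toList_append, pv_toList_join]
  have : (List.replicate W "+---").map String.toList = List.replicate W ['+', '-', '-', '-'] := by
    simp [List.map_replicate]
  rw [this]; simp

theorem pv_toList_F (W : Nat) :
    (pvF W).toList = (List.replicate W ['|', ' ', ' ', ' ']).flatten ++ ['|', '\n'] := by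
  unfold pvF
  rw [String.toList_append, pv_toList_join]
  have : (List.replicate W "|   ").map String.toList = List.replicate W ['|', ' ', ' ', ' '] := by
    simp [List.map_replicate]
  rw [this]; simp

-- alternating rows, generically in the two row char-lists
theorem pv_rows (E F : List Char) :
    ∀ K : Nat,
      ((List.range (2 * K + 1)).map (fun r => if r % 2 == 0 then E else F)).flatten =
      (List.replicate K (E ++ F)).flatten ++ E := by
  intro K
  induction K with
  | zero => simp
  | succ n ih =>
      have h2 : 2 * (n + 1) + 1 = (2 * n + 1) + 2 := by ring
      have hsplit : List.range ((2 * n + 1) + 2) = List.range (2 * n + 1) ++ [2 * n + 1, 2 * n + 1 + 1] := by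
        rw [List.range_add]; rfl
      rw [h2, hsplit, List.map_append, List.flatten_append, ih,
          List.replicate_succ', List.flatten_append]
      have ho : ((2 * n + 1) % 2 == 0) = false := by simp
      have he : ((2 * n + 1 + 1) % 2 == 0) = true := by simp; omega
      simp only [List.map_cons, List.map_nil, List.flatten_cons, List.flatten_nil,
                 List.append_nil, ho, he, if_true]
      simp [List.append_assoc]

theorem prostokat_eq (k w : Int) : prostokat k w = prostokat_alt k w := by
  apply String.toList_inj.mp
  rw [prostokat_closed]
  unfold prostokat_alt
  simp only []
  set EL : String := String.ofList ((List.range (4 * w.toNat + 1)).map (fun c => if c % 4 == 0 then '+' else '-')) ++ "\n" with hEL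
  set FL : String := String.ofList ((List.range (4 * w.toNat + 1)).map (fun c => if c % 4 == 0 then '|' else ' ')) ++ "\n" with hFL
  have hmap : (List.range (2 * k.toNat + 1)).map (fun r => if r % 2 == 0 then EL else FL)
      = (List.range (2 * k.toNat + 1)).map (fun r => if r % 2 == 0 then (pvE w.toNat) else (pvF w.toNat)) := by
    have hE : EL = pvE w.toNat := by
      apply String.toList_inj.mp
      rw [hEL, String.toList_append, pv_toList_E]
      simp [pv_row_edge]
    have hF : FL = pvF w.toNat := by
      apply String.toList_inj.mp
      rw [hFL, String.toList_append, pv_toList_F]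
      simp [pv_row_fill]
    rw [hE, hF]
  rw [hmap, String.toList_append, pv_toList_join, pv_toList_join,
      List.map_map, List.map_replicate]
  have hcomm : (List.range (2 * k.toNat + 1)).map
      (String.toList ∘ fun r => if r % 2 == 0 then pvE w.toNat else pvF w.toNat)
      = (List.range (2 * k.toNat + 1)).map
        (fun r => if r % 2 == 0 then (pvE w.toNat).toList else (pvF w.toNat).toList) := by
    apply List.map_congr_left
    intro r _
    by_cases h : r % 2 = 0 <;> simp [h]
  rw [hcomm, pv_rows _ _ k.toNat]
  simp [String.toList_append]

-- ===== VERDICT (by name: the statement is the Claim_ definition above) =====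
theorem prostokat_spec : Claim_equal_prostokat := by
  intro k w _
  exact prostokat_eq k w
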